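-- pv_equiv track=rewrite | github.com/shahshlok/tracer | utils/inject_comments.py | inject_todo_comment
-- ===== SOURCE A (Python) =====
-- def inject_todo_comment(content):
--     lines = content.split('\n')
--     new_lines = []
--
--     for line in lines:
--         new_lines.append(line)
--         if "public class" in line:
--              new_lines.append("// TODO: Clean up code before submission")
--
--     return '\n'.join(new_lines)
-- ===== SOURCE B (Python) =====
-- import re
--
-- TODO_COMMENT = "// TODO: Clean up code before submission"
--
-- # Anchored multiline pattern: one whole line containing the literal words public class.
-- LINE_RE = re.compile(r'^.*public class.*$', re.MULTILINE)
--
-- def inject_todo_comment(content):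
--     # One regex substitution over the whole text: the dot does not cross newlines
--     # and the anchors bind the match to one whole line, so each line containing
--     # the marker is replaced by itself plus the TODO comment on the next line.
--     return LINE_RE.sub(lambda m: m.group(0) + '\n' + TODO_COMMENT, content)
-- ===== Notes on version B (the rewrite author's own statement) =====
-- stated objective: idiomatic
-- what changed: Replaces the split-into-lines / accumulator-loop / join pipeline by a single anchored-multiline regex substitution over the whole text (a pattern matching each whole line containing the marker words public class, with a replacement function appending the TODO comment); no line list or accumulator is built.
import Mathlib
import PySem

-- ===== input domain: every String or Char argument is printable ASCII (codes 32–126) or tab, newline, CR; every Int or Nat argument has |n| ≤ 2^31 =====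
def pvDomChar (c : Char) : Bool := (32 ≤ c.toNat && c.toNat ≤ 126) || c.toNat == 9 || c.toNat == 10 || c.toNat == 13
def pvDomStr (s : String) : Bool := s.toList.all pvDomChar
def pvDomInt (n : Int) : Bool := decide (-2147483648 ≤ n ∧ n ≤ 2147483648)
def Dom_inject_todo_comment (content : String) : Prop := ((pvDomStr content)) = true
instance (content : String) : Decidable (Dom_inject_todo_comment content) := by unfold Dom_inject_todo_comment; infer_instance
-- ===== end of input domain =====

-- B replaces A's split-into-lines / accumulator-loop / join pipeline by a single
-- regex substitution over the whole text (re.sub r'.*public class.*'), ported as the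
-- position-by-position scan that regex performs; idiomatic, same asymptotic cost.


-- ===== PORT A =====
def pvTodo : String := "// TODO: Clean up code before submission"

-- content.split('\n'): the separator '\n' is nonempty, so split? is always `some`;
-- getD [] only totalizes and is never reached.
def pvLines (content : String) : List String :=
  (PySem.Str.split? content "\n").getD []

def inject_todo_comment (content : String) : String :=
  let lines := pvLines content
  let new_lines := lines.foldl (fun new_lines line =>
    let new_lines := new_lines ++ [line]
    if PySem.Str.isIn "public class" line then new_lines ++ [pvTodo] else new_lines) []
  PySem.Str.join "\n" new_lines

-- ===== PORT B =====
def pvTargetChars : List Char := "public class".toList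
def pvTodoChars : List Char := "// TODO: Clean up code before submission".toList

-- Hand port of LINE_RE.sub (pattern: caret dot-star "public class" dot-star dollar,
-- MULTILINE) with the replacement function appending the TODO comment.  The regex
-- engine tries a match at each position left to right; the caret only matches at a
-- line start (tracked by atStart), the dot never matches a newline, and the greedy
-- match is then exactly the remainder-of-line, which must contain the literal
-- "public class"; it is replaced by itself plus the comment and scanning resumes
-- after it.  A failed attempt copies one character.  Exact: the pattern cannot
-- match the empty string, so no empty-match insertion arises.
def reSubScan (atStart : Bool) (cs : List Char) : List Char :=
  match cs with
  | [] => []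
  | c :: rest =>
    if atStart = true ∧ c ≠ '\n' ∧ PySem.Chars.isIn pvTargetChars (c :: rest.takeWhile (fun x => x != '\n')) = true then
      (c :: rest.takeWhile (fun x => x != '\n')) ++ '\n' :: pvTodoChars
        ++ reSubScan false (rest.dropWhile (fun x => x != '\n'))
    else
      c :: reSubScan (c == '\n') rest
termination_by cs.length
decreasing_by
  · exact Nat.lt_succ_of_le (List.length_dropWhile_le _ _)
  · simp

def inject_todo_comment_alt (content : String) : String :=
  String.ofList (reSubScan true content.toList)

-- ===== PRECONDITION & SPEC =====
def Spec_inject_todo_comment (content : String) (out : String) : Prop := out = inject_todo_comment_alt content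
instance (content : String) (out : String) : Decidable (Spec_inject_todo_comment content out) := by unfold Spec_inject_todo_comment; infer_instance

-- ===== CLAIM (what is proved, stated in full; the proofs are below) =====
def Claim_equal_inject_todo_comment : Prop := ∀ (content : String), Dom_inject_todo_comment content → Spec_inject_todo_comment content (inject_todo_comment content)

-- ===== LEMMAS AND PROOFS =====

-- clean recursive description of split-on-'\n'
def pvSpl : List Char → List (List Char)
  | [] => [[]]
  | c :: rest => if c = '\n' then [] :: pvSpl rest else (pvSpl rest).modifyHead (c :: ·)

-- per-line transform both programs perform
def pvF (l : List Char) : List Char :=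
  if PySem.Chars.isIn pvTargetChars l then l ++ '\n' :: pvTodoChars else l

theorem pvSpl_ne_nil (cs : List Char) : pvSpl cs ≠ [] := by
  induction cs with
  | nil => simp [pvSpl]
  | cons c rest ih =>
    simp only [pvSpl]
    split
    · simp
    · cases h : pvSpl rest with
      | nil => exact absurd h ih
      | cons a t => simp

theorem pv_splitOn_go (fuel : Nat) :
    ∀ (l : List Char), l.length < fuel → ∀ (cur : List Char) (acc : List (List Char)),
      PySem.Chars.splitOn.go ['\n'] fuel l cur acc
        = acc.reverse ++ (pvSpl l).modifyHead (cur.reverse ++ ·) := by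
  induction fuel with
  | zero => intro l hl; omega
  | succ f ih =>
    intro l hl cur acc
    cases l with
    | nil =>
      simp [PySem.Chars.splitOn.go, pvSpl]
    | cons c rest =>
      by_cases hc : c = '\n'
      · subst hc
        rw [show PySem.Chars.splitOn.go ['\n'] (f+1) ('\n' :: rest) cur acc
              = PySem.Chars.splitOn.go ['\n'] f rest [] (cur.reverse :: acc) from by
            simp [PySem.Chars.splitOn.go, List.isPrefixOf]]
        rw [ih rest (by simpa using Nat.lt_of_succ_lt_succ hl)]
        obtain ⟨h, t, hh⟩ := List.exists_cons_of_ne_nil (pvSpl_ne_nil rest)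
        simp [pvSpl, hh]
      · rw [show PySem.Chars.splitOn.go ['\n'] (f+1) (c :: rest) cur acc
              = PySem.Chars.splitOn.go ['\n'] f rest (c :: cur) acc from by
            simp [PySem.Chars.splitOn.go, List.isPrefixOf, Ne.symm hc]]
        rw [ih rest (by simpa using Nat.lt_of_succ_lt_succ hl)]
        obtain ⟨h, t, hh⟩ := List.exists_cons_of_ne_nil (pvSpl_ne_nil rest)
        simp [pvSpl, hc, hh]

theorem pv_splitOn_eq (cs : List Char) :
    PySem.Chars.splitOn cs ['\n'] = pvSpl cs := by
  unfold PySem.Chars.splitOn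
  rw [pv_splitOn_go (cs.length + 1) cs (by omega)]
  obtain ⟨h, t, hh⟩ := List.exists_cons_of_ne_nil (pvSpl_ne_nil cs)
  simp [hh]

theorem pvSpl_append_line (l : List Char) (hl : ∀ x ∈ l, x ≠ '\n') (r : List Char) :
    pvSpl (l ++ r) = (pvSpl r).modifyHead (l ++ ·) := by
  induction l with
  | nil =>
    obtain ⟨h, t, hh⟩ := List.exists_cons_of_ne_nil (pvSpl_ne_nil r)
    simp [hh]
  | cons a l ih =>
    have ha : a ≠ '\n' := hl a (by simp)
    obtain ⟨h, t, hh⟩ := List.exists_cons_of_ne_nil (pvSpl_ne_nil r)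
    rw [List.cons_append]
    simp only [pvSpl, if_neg ha, ih (fun x hx => hl x (by simp [hx])), hh]
    simp

theorem pvSpl_head (r : List Char) :
    ∃ t, pvSpl r = r.takeWhile (fun x => x != '\n') :: t := by
  induction r with
  | nil => exact ⟨[], rfl⟩
  | cons a r ih =>
    obtain ⟨t, ht⟩ := ih
    by_cases ha : a = '\n'
    · subst ha
      exact ⟨pvSpl r, by simp [pvSpl]⟩
    · refine ⟨t, ?_⟩
      simp [pvSpl, ha, ht]

theorem pv_isIn_tail {c : Char} {l : List Char}
    (h : PySem.Chars.isIn pvTargetChars (c :: l) = false) :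
    PySem.Chars.isIn pvTargetChars l = false := by
  rw [PySem.Chars.isIn_eq_false_iff] at h ⊢
  intro hinf
  exact h (hinf.trans (List.suffix_cons c l).isInfix)

-- the scan computes join-of-per-line-transform; atStart = false is only reached
-- mid-line, where the rest of the line is known not to contain the target
theorem pv_scan_gen : ∀ (n : Nat) (cs : List Char), cs.length ≤ n → ∀ (b : Bool),
    (b = false → PySem.Chars.isIn pvTargetChars (cs.takeWhile (fun x => x != '\n')) = false) →
    reSubScan b cs = PySem.Chars.join ['\n'] ((pvSpl cs).map pvF) := by
  intro n
  induction n with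
  | zero =>
    intro cs hcs b _
    rw [List.length_eq_zero_iff.mp (Nat.le_zero.mp hcs)]
    rw [reSubScan]
    simp [pvSpl, PySem.Chars.join_singleton, show pvF [] = [] from by decide]
  | succ n ihn =>
    intro cs hcs b hb
    cases cs with
    | nil =>
      rw [reSubScan]
      simp [pvSpl, PySem.Chars.join_singleton, show pvF [] = [] from by decide]
    | cons c rest =>
      have hrest : rest.length ≤ n := by simpa using Nat.le_of_succ_le_succ hcs
      by_cases hguard : b = true ∧ c ≠ '\n' ∧ PySem.Chars.isIn pvTargetChars (c :: rest.takeWhile (fun x => x != '\n')) = true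
      · obtain ⟨hb', hc, hin⟩ := hguard
        rw [reSubScan, if_pos ⟨hb', hc, hin⟩]
        have hfree : ∀ x ∈ c :: rest.takeWhile (fun x => x != '\n'), x ≠ '\n' := by
          intro x hx
          rcases List.mem_cons.mp hx with rfl | hx
          · exact hc
          · simpa using List.mem_takeWhile_imp hx
        have hsplit : pvSpl (c :: rest)
            = (pvSpl (rest.dropWhile (fun x => x != '\n'))).modifyHead
                ((c :: rest.takeWhile (fun x => x != '\n')) ++ ·) := by
          conv_lhs => rw [show c :: rest
            = (c :: rest.takeWhile (fun x => x != '\n')) ++ rest.dropWhile (fun x => x != '\n') from by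
              simp [List.takeWhile_append_dropWhile]]
          exact pvSpl_append_line _ hfree _
        cases hdw : rest.dropWhile (fun x => x != '\n') with
        | nil =>
          rw [hdw] at hsplit
          rw [hsplit]
          rw [show reSubScan false [] = [] from by rw [reSubScan]]
          simp [pvSpl, pvF, hin, PySem.Chars.join_singleton]
        | cons d dw' =>
          have hd : d = '\n' := by
            have := List.head_dropWhile_not (fun x => x != '\n') (l := rest) (by simp [hdw])
            simpa [hdw] using this
          subst hd
          rw [hdw] at hsplit
          have hdw' : dw'.length ≤ n := by
            have := List.length_dropWhile_le (fun x => x != '\n') rest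
            rw [hdw] at this
            simp at this
            omega
          obtain ⟨h', t', hh'⟩ := List.exists_cons_of_ne_nil (pvSpl_ne_nil dw')
          have ihval : reSubScan false ('\n' :: dw')
              = '\n' :: PySem.Chars.join ['\n'] ((pvSpl dw').map pvF) := by
            rw [reSubScan, if_neg (by simp)]
            rw [show (('\n' : Char) == '\n') = true from by decide]
            rw [ihn dw' hdw' true (by simp)]
          rw [ihval, hsplit]
          simp only [pvSpl, if_true, List.modifyHead_cons, List.map_cons, hh']
          rw [show pvF ((c :: rest.takeWhile (fun x => x != '\n')) ++ [])
                = (c :: rest.takeWhile (fun x => x != '\n')) ++ '\n' :: pvTodoChars from by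
            simp [pvF, hin]]
          rw [PySem.Chars.join_cons_cons]
          simp [hh']
      · rw [reSubScan, if_neg hguard]
        by_cases hc : c = '\n'
        · subst hc
          rw [show (('\n' : Char) == '\n') = true from by decide]
          obtain ⟨h', t', hh'⟩ := List.exists_cons_of_ne_nil (pvSpl_ne_nil rest)
          simp only [pvSpl, reduceIte, List.map_cons, hh']
          rw [show pvF [] = [] from by decide, PySem.Chars.join_cons_cons,
              ihn rest hrest true (by simp)]
          simp [hh']
        · have hin : PySem.Chars.isIn pvTargetChars (c :: rest.takeWhile (fun x => x != '\n')) = false := by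
            cases b with
            | false =>
              have := hb rfl
              rwa [List.takeWhile_cons, if_pos (by simpa using hc)] at this
            | true =>
              rcases Bool.eq_false_or_eq_true (PySem.Chars.isIn pvTargetChars (c :: rest.takeWhile (fun x => x != '\n'))) with ht | hf
              · exact absurd ⟨rfl, hc, ht⟩ hguard
              · exact hf
          have hcb : (c == '\n') = false := by simpa using hc
          rw [hcb]
          obtain ⟨t, ht⟩ := pvSpl_head rest
          have hinT : PySem.Chars.isIn pvTargetChars (rest.takeWhile (fun x => x != '\n')) = false :=
            pv_isIn_tail hin
          rw [ihn rest hrest false (fun _ => hinT), ht]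
          simp only [pvSpl, if_neg hc, ht, List.modifyHead_cons, List.map_cons]
          rw [show pvF (c :: rest.takeWhile (fun x => x != '\n'))
                = c :: rest.takeWhile (fun x => x != '\n') from by simp [pvF, hin]]
          rw [show pvF (rest.takeWhile (fun x => x != '\n'))
                = rest.takeWhile (fun x => x != '\n') from by simp [pvF, hinT]]
          cases t with
          | nil => simp [PySem.Chars.join_singleton]
          | cons u t' =>
            rw [List.map_cons, PySem.Chars.join_cons_cons, PySem.Chars.join_cons_cons]
            simp

theorem pv_scan_eq (cs : List Char) :
    reSubScan true cs = PySem.Chars.join ['\n'] ((pvSpl cs).map pvF) :=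
  pv_scan_gen cs.length cs le_rfl true (by simp)

-- join distributes over concatenation of two nonempty block lists
theorem pv_join_append (sep : List Char) (ys : List (List Char)) (hy : ys ≠ []) :
    ∀ (xs : List (List Char)), xs ≠ [] →
      PySem.Chars.join sep (xs ++ ys) = PySem.Chars.join sep xs ++ sep ++ PySem.Chars.join sep ys := by
  intro xs
  induction xs with
  | nil => intro h; exact absurd rfl h
  | cons a t ih =>
    intro _
    cases t with
    | nil =>
      obtain ⟨y, ty, rfl⟩ : ∃ y ty, ys = y :: ty := by
        cases ys with
        | nil => exact absurd rfl hy
        | cons y ty => exact ⟨y, ty, rfl⟩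
      simp [PySem.Chars.join_cons_cons, PySem.Chars.join_singleton]
    | cons b t' =>
      have hih := ih (by simp)
      have hcons : (b :: t') ++ ys = b :: (t' ++ ys) := rfl
      rw [show (a :: b :: t') ++ ys = a :: ((b :: t') ++ ys) from rfl, hcons,
          PySem.Chars.join_cons_cons, ← hcons, hih, PySem.Chars.join_cons_cons]
      simp [List.append_assoc]

-- joining the flattened blocks = joining each block's own per-line transform
theorem pv_core {α : Type} (sep : List Char) (G : α → List (List Char)) (F : α → List Char)
    (hne : ∀ l, G l ≠ []) (hF : ∀ l, F l = PySem.Chars.join sep (G l)) (lines : List α) :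
    PySem.Chars.join sep (lines.flatMap G) = PySem.Chars.join sep (lines.map F) := by
  induction lines with
  | nil => rfl
  | cons l rest ih =>
    cases rest with
    | nil =>
      simp only [List.flatMap_cons, List.flatMap_nil, List.append_nil, List.map_cons,
        List.map_nil, PySem.Chars.join_singleton, hF]
    | cons r t =>
      have hflat : (r :: t).flatMap G ≠ [] := by
        simp only [List.flatMap_cons]
        intro h
        exact hne r (List.append_eq_nil_iff.mp h).1
      rw [List.flatMap_cons, pv_join_append sep _ hflat (G l) (hne l), ← hF l, ih]
      simp only [List.map_cons, PySem.Chars.join_cons_cons]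

theorem inject_todo_comment_spec : Claim_equal_inject_todo_comment := by
  intro content _
  unfold Spec_inject_todo_comment inject_todo_comment inject_todo_comment_alt
  simp only []
  apply String.toList_inj.mp
  rw [pv_scan_eq]
  -- reduce A's side to character lists
  have hlines : pvLines content
      = (PySem.Chars.splitOn content.toList ['\n']).map String.ofList := by
    rfl
  -- A's loop body extends the accumulator by one or two elements
  have hbody : (fun (acc : List String) line =>
      let acc' := acc ++ [line]
      if PySem.Str.isIn "public class" line then acc' ++ [pvTodo] else acc')
      = fun acc line => acc ++ (if PySem.Str.isIn "public class" line then [line, pvTodo] else [line]) := by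
    funext acc line
    cases hh : PySem.Str.isIn "public class" line <;> simp [List.append_assoc]
  rw [hbody, PySem.List.foldl_append_eq_flatMap, List.nil_append]
  unfold PySem.Str.join
  simp only [String.toList_ofList]
  rw [show ("\n" : String).toList = ['\n'] from by decide]
  rw [List.map_flatMap, hlines]
  rw [List.flatMap_map, pv_splitOn_eq]
  have hG : (fun (l : List Char) => List.map String.toList
        (if PySem.Str.isIn "public class" (String.ofList l) then [String.ofList l, pvTodo] else [String.ofList l]))
      = fun l : List Char => if PySem.Chars.isIn pvTargetChars l then [l, pvTodoChars] else [l] := by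
    funext l
    have : PySem.Str.isIn "public class" (String.ofList l) = PySem.Chars.isIn pvTargetChars l := by
      simp [PySem.Str.isIn, pvTargetChars]
    rw [this]
    split <;> simp [pvTodo, pvTodoChars]
  rw [show (fun (l : List Char) => List.map String.toList
        (if PySem.Str.isIn "public class" (String.ofList l) = true then [String.ofList l, pvTodo] else [String.ofList l])) = _ from hG]
  refine pv_core ['\n'] (fun l => if PySem.Chars.isIn pvTargetChars l then [l, pvTodoChars] else [l]) pvF
    (fun l => by by_cases h : PySem.Chars.isIn pvTargetChars l <;> simp [h])
    (fun l => ?_) (pvSpl content.toList)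
  by_cases h : PySem.Chars.isIn pvTargetChars l = true <;>
    simp [h, pvF, PySem.Chars.join_cons_cons, PySem.Chars.join_singleton]
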